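-- pv_equiv track=rewrite | github.com/crazy3water/spinalYOLO3 | testcode.py | dealCluster
-- ===== SOURCE A (Python) =====
-- def dealCluster(clusters,clusData):
--     clusterDic = {}
--     if len(clusters) > 2:
--         for cluster,data in zip(clusters,clusData):
--             if cluster not  in clusterDic.keys():
--                 clusterDic[cluster] = [data]
--             else:
--                 clusterDic[cluster].append(data)
--
--         for key,value in clusterDic.items():
--             clusterDic[key] = value[int(len(value) / 2)]
--     return clusterDic
-- ===== SOURCE B (Python) =====
-- def dealCluster(clusters, clusData):
--     # Two streaming passes over zip(clusters, clusData): pass 1 counts each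
--     # cluster and seeds the result with its first datum (fixing key order);
--     # pass 2 keeps a running per-cluster index and overwrites the seed with
--     # the datum at position count//2.  No per-cluster lists are ever stored.
--     if len(clusters) <= 2:
--         return {}
--     counts = {}
--     result = {}
--     for c, d in zip(clusters, clusData):
--         counts[c] = counts.get(c, 0) + 1
--         if c not in result:
--             result[c] = d
--     pos = {}
--     for c, d in zip(clusters, clusData):
--         i = pos.get(c, 0)
--         if i == counts[c] // 2:
--             result[c] = d
--         pos[c] = i + 1
--     return result
-- ===== Notes on version B (the rewrite author's own statement) =====
-- stated objective: alternative
-- what changed: Replaces A's grouping dict of full per-cluster lists (then an index into each list) by two streaming passes over zip(clusters, clusData): one building a counts dict and seeding result keys with the first datum, one keeping a per-cluster running index and overwriting the seed with the datum at position count//2, so no per-cluster lists are ever stored.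
import Mathlib
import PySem

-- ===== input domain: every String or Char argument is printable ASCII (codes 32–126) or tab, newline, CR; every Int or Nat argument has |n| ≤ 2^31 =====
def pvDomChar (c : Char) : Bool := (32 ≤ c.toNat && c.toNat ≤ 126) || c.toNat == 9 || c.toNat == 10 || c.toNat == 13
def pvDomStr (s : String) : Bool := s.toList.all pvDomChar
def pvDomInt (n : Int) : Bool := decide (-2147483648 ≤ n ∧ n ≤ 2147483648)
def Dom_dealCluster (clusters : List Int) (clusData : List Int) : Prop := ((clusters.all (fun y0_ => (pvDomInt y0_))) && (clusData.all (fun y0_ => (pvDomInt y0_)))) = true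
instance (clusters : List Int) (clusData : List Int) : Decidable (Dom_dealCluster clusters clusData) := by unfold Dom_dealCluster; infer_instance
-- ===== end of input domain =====

-- B streams over zip twice (counts + seed, then running index), never storing
-- per-cluster lists; same return value as A, no side effects in either.

-- ===== PORT A =====
-- value[int(len(value)/2)] : group lists are nonempty, so the index is always
-- in range (the getD 0 default is unreachable).
def dealClusterMid (v : List Int) : Int :=
  (PySem.List.pyGet? v ((v.length / 2 : Nat) : Int)).getD 0

def dealCluster (clusters : List Int) (clusData : List Int) : List (Int × Int) :=
  if clusters.length > 2 then
    let pairs := clusters.zip clusData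
    let g : PySem.Dict Int (List Int) :=
      pairs.foldl (fun d p =>
        if d.contains p.1 then d.insert p.1 (d.getD p.1 [] ++ [p.2])
        else d.insert p.1 [p.2]) PySem.Dict.empty
    -- second loop reassigns each existing key in place: items order preserved
    (g.items.map (fun kv => (kv.1, dealClusterMid kv.2)))
  else []

-- ===== PORT B =====
def dealCluster_alt (clusters : List Int) (clusData : List Int) : List (Int × Int) :=
  if clusters.length > 2 then
    let pairs := clusters.zip clusData
    let s1 := pairs.foldl
      (fun (st : PySem.Dict Int Int × PySem.Dict Int Int) p =>
        (st.1.insert p.1 (st.1.getD p.1 0 + 1),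
         if st.2.contains p.1 then st.2 else st.2.insert p.1 p.2))
      (PySem.Dict.empty, PySem.Dict.empty)
    let counts := s1.1
    let s2 := pairs.foldl
      (fun (st : PySem.Dict Int Int × PySem.Dict Int Int) p =>
        let i := st.2.getD p.1 0
        ((if i = PySem.Int.floordiv (counts.getD p.1 0) 2 then st.1.insert p.1 p.2 else st.1),
         st.2.insert p.1 (i + 1)))
      (s1.2, PySem.Dict.empty)
    s2.1.items
  else []

-- ===== PRECONDITION & SPEC =====
def Spec_dealCluster (clusters : List Int) (clusData : List Int) (out : List (Int × Int)) : Prop := out = dealCluster_alt clusters clusData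
instance (clusters : List Int) (clusData : List Int) (out : List (Int × Int)) : Decidable (Spec_dealCluster clusters clusData out) := by unfold Spec_dealCluster; infer_instance

-- ===== CLAIM (what is proved, stated in full; the proofs are below) =====
def Claim_equal_dealCluster : Prop := ∀ (clusters : List Int) (clusData : List Int), Dom_dealCluster clusters clusData → Spec_dealCluster clusters clusData (dealCluster clusters clusData)

-- ===== LEMMAS AND PROOFS =====

-- A's grouping step, rewritten as a single keyed insert (both branches insert at p.1)
theorem pvA_step_insert :
    (fun (d : PySem.Dict Int (List Int)) (p : Int × Int) =>
      if d.contains p.1 then d.insert p.1 (d.getD p.1 [] ++ [p.2]) else d.insert p.1 [p.2])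
    = fun d p => d.insert p.1 (if d.contains p.1 then d.getD p.1 [] ++ [p.2] else [p.2]) := by
  funext d p
  by_cases h : d.contains p.1 <;> simp [h]

-- value stored at c by A's grouping fold: the data of c's pairs, in order
theorem pvA_getD (l : List (Int × Int)) (d : PySem.Dict Int (List Int)) (c : Int) :
    (l.foldl (fun d p => d.insert p.1 (if d.contains p.1 then d.getD p.1 [] ++ [p.2] else [p.2])) d).getD c []
      = d.getD c [] ++ (l.filter (fun p => p.1 == c)).map Prod.snd := by
  induction l generalizing d with
  | nil => simp
  | cons p l ih =>
    rw [List.foldl_cons, ih, List.filter_cons]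
    by_cases hk : p.1 = c
    · subst hk
      rw [PySem.Dict.getD_insert_self]
      by_cases hcon : d.contains p.1
      · simp [hcon]
      · rw [Bool.not_eq_true] at hcon
        rw [PySem.Dict.getD_of_not_contains d _ hcon]
        simp [hcon]
    · rw [PySem.Dict.getD_insert_of_ne d _ _ (fun h => hk h.symm)]
      simp [hk]

-- B's counting fold
theorem pvB_counts (l : List (Int × Int)) (d : PySem.Dict Int Int) (c : Int) :
    (l.foldl (fun d p => d.insert p.1 (d.getD p.1 0 + 1)) d).getD c 0
      = d.getD c 0 + ((l.map Prod.fst).count c : Int) := by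
  induction l generalizing d with
  | nil => simp
  | cons p l ih =>
    rw [List.foldl_cons, ih, List.map_cons, List.count_cons]
    by_cases hk : p.1 = c
    · subst hk
      rw [PySem.Dict.getD_insert_self]
      simp only [beq_self_eq_true, if_true]
      push_cast
      ring
    · rw [PySem.Dict.getD_insert_of_ne d _ _ (fun h => hk h.symm)]
      simp [hk]

-- B's seeding fold: keys in first-appearance order
theorem pvB_seed_keys (l : List (Int × Int)) (d : PySem.Dict Int Int) :
    (l.foldl (fun d p => if d.contains p.1 then d else d.insert p.1 p.2) d).keys
      = PySem.Set.update d.keys (l.map Prod.fst) := by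
  induction l generalizing d with
  | nil => simp [PySem.Set.update]
  | cons p l ih =>
    rw [List.foldl_cons, ih, List.map_cons, PySem.Set.update_cons]
    congr 1
    by_cases h : d.contains p.1
    · rw [if_pos h, PySem.Set.add_of_mem ((PySem.Dict.contains_iff_mem_keys d p.1).mp h)]
    · rw [if_neg h, Bool.not_eq_true] at *
      rw [PySem.Dict.keys_insert_of_not_contains d _ h,
        PySem.Set.add_of_not_mem (fun hm => by simp [(PySem.Dict.contains_iff_mem_keys d p.1).mpr hm] at h)]

-- B's second pass never adds a key when all keys are already present
theorem pvB_res_keys (m : Int → Int) (l : List (Int × Int)) (res pos : PySem.Dict Int Int)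
    (h : ∀ p ∈ l, res.contains p.1 = true) :
    ((l.foldl (fun (st : PySem.Dict Int Int × PySem.Dict Int Int) p =>
        ((if st.2.getD p.1 0 = m p.1 then st.1.insert p.1 p.2 else st.1),
         st.2.insert p.1 (st.2.getD p.1 0 + 1))) (res, pos)).1).keys = res.keys := by
  induction l generalizing res pos with
  | nil => rfl
  | cons p l ih =>
    rw [List.foldl_cons]
    have hp : res.contains p.1 = true := h p (List.mem_cons_self ..)
    by_cases hc : pos.getD p.1 0 = m p.1
    · rw [if_pos hc,
        ih _ _ (fun q hq => by
          rw [PySem.Dict.contains_insert]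
          simp [h q (List.mem_cons_of_mem _ hq)]),
        PySem.Dict.keys_insert_of_contains res _ hp]
    · rw [if_neg hc, ih _ _ (fun q hq => h q (List.mem_cons_of_mem _ hq))]

-- B's second pass, value at c: the datum at offset m c within c's remaining data
-- (counted from the running index pos.getD c 0), else the value already in res
theorem pvB_res (m : Int → Int) (l : List (Int × Int)) (res pos : PySem.Dict Int Int) (c : Int) :
    ((l.foldl (fun (st : PySem.Dict Int Int × PySem.Dict Int Int) p =>
        ((if st.2.getD p.1 0 = m p.1 then st.1.insert p.1 p.2 else st.1),
         st.2.insert p.1 (st.2.getD p.1 0 + 1))) (res, pos)).1).getD c 0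
      = if pos.getD c 0 ≤ m c ∧ m c < pos.getD c 0 + ((l.map Prod.fst).count c : Int)
        then ((l.filter (fun p => p.1 == c)).map Prod.snd).getD (m c - pos.getD c 0).toNat 0
        else res.getD c 0 := by
  induction l generalizing res pos with
  | nil => simp
  | cons p l ih =>
    rw [List.foldl_cons, ih, List.map_cons, List.count_cons, List.filter_cons]
    by_cases hk : p.1 = c
    · subst hk
      simp only [beq_self_eq_true, if_true, List.map_cons]
      rw [PySem.Dict.getD_insert_self]
      by_cases hc : pos.getD p.1 0 = m p.1
      · rw [if_pos hc, PySem.Dict.getD_insert_self, if_neg (by omega), if_pos (by omega)]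
        have h0 : (m p.1 - pos.getD p.1 0).toNat = 0 := by omega
        rw [h0, List.getD_cons_zero]
      · rw [if_neg hc]
        by_cases h2 : pos.getD p.1 0 + 1 ≤ m p.1 ∧
            m p.1 < pos.getD p.1 0 + 1 + ((l.map Prod.fst).count p.1 : Int)
        · rw [if_pos h2, if_pos (by omega)]
          have h3 : (m p.1 - pos.getD p.1 0).toNat = (m p.1 - (pos.getD p.1 0 + 1)).toNat + 1 := by
            omega
          rw [h3, List.getD_cons_succ]
        · rw [if_neg h2, if_neg (by omega)]
    · have hne : c ≠ p.1 := fun h => hk h.symm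
      rw [PySem.Dict.getD_insert_of_ne pos _ _ hne]
      by_cases hc : pos.getD p.1 0 = m p.1
      · rw [if_pos hc, PySem.Dict.getD_insert_of_ne res _ _ hne]
        simp [hk]
      · rw [if_neg hc]
        simp [hk]

-- the length of c's data list is the multiplicity of c among the keys
theorem pvGrpLen (l : List (Int × Int)) (c : Int) :
    ((l.filter (fun p => p.1 == c)).map Prod.snd).length = (l.map Prod.fst).count c := by
  induction l with
  | nil => rfl
  | cons p l ih =>
    rw [List.map_cons, List.count_cons, List.filter_cons]
    by_cases hk : p.1 = c
    · subst hk; simp [ih]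
    · simp [hk, ih]

-- ===== VERDICT (by name: the statement is the Claim_ definition above) =====
theorem dealCluster_spec : Claim_equal_dealCluster := by
  intro clusters clusData _
  unfold Spec_dealCluster dealCluster dealCluster_alt
  by_cases h : clusters.length > 2
  · rw [if_pos h, if_pos h]
    simp only [pvA_step_insert, PySem.List.foldl_prod_mk
      (f := fun (d : PySem.Dict Int Int) (p : Int × Int) => d.insert p.1 (d.getD p.1 0 + 1))
      (g := fun (d : PySem.Dict Int Int) (p : Int × Int) =>
        if d.contains p.1 then d else d.insert p.1 p.2)]
    set l := clusters.zip clusData with hl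
    set cD := List.foldl (fun (d : PySem.Dict Int Int) (p : Int × Int) =>
      d.insert p.1 (d.getD p.1 0 + 1)) PySem.Dict.empty l with hcD
    set seed := List.foldl (fun (d : PySem.Dict Int Int) (p : Int × Int) =>
      if d.contains p.1 = true then d else d.insert p.1 p.2) PySem.Dict.empty l with hseed
    have hSeedKeys : seed.keys = PySem.Set.ofList (l.map Prod.fst) := by
      rw [hseed, pvB_seed_keys, PySem.Dict.keys_empty, PySem.Set.update_nil_left]
    have hcont : ∀ p ∈ l, seed.contains p.1 = true := fun p hp =>
      (PySem.Dict.contains_iff_mem_keys _ _).mpr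
        (hSeedKeys ▸ (PySem.Set.mem_ofList _ _).mpr (List.mem_map_of_mem hp))
    have hNodA : (List.foldl (fun d p => d.insert p.1
        (if d.contains p.1 = true then d.getD p.1 [] ++ [p.2] else [p.2]))
        PySem.Dict.empty l).keys.Nodup :=
      PySem.Dict.nodup_keys_foldl_insert_key l Prod.fst _ PySem.Dict.empty
        (by rw [PySem.Dict.keys_empty]; exact List.nodup_nil)
    have hRkeys := pvB_res_keys (fun k => PySem.Int.floordiv (cD.getD k 0) 2) l seed
        PySem.Dict.empty hcont
    have hNodR : (((l.foldl (fun (st : PySem.Dict Int Int × PySem.Dict Int Int) p =>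
        ((if st.2.getD p.1 0 = PySem.Int.floordiv (cD.getD p.1 0) 2
          then st.1.insert p.1 p.2 else st.1),
         st.2.insert p.1 (st.2.getD p.1 0 + 1))) (seed, PySem.Dict.empty)).1)).keys.Nodup := by
      rw [hRkeys, hSeedKeys]; exact PySem.Set.nodup_ofList _
    rw [PySem.Dict.items_eq_map_keys _ hNodA ([] : List Int), List.map_map,
      PySem.Dict.items_eq_map_keys _ hNodR (0 : Int),
      PySem.Dict.keys_foldl_insert_key, PySem.Dict.keys_empty, PySem.Set.update_nil_left,
      hRkeys, hSeedKeys]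
    apply List.map_congr_left
    intro k hk
    simp only [Function.comp_apply, Prod.mk.injEq, true_and]
    have hmem : k ∈ l.map Prod.fst := (PySem.Set.mem_ofList _ _).mp hk
    have hpos : 0 < (l.map Prod.fst).count k := List.count_pos_iff.mpr hmem
    have hcd : cD.getD k 0 = ((l.map Prod.fst).count k : Int) := by
      rw [hcD, pvB_counts, PySem.Dict.getD_empty]; ring
    have hfd : PySem.Int.floordiv (cD.getD k 0) 2
        = (((l.map Prod.fst).count k / 2 : Nat) : Int) := by
      rw [hcd]; exact_mod_cast PySem.Int.floordiv_natCast _ 2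
    rw [pvA_getD l PySem.Dict.empty k, PySem.Dict.getD_empty, List.nil_append,
      pvB_res (fun k => PySem.Int.floordiv (cD.getD k 0) 2) l seed PySem.Dict.empty k,
      PySem.Dict.getD_empty]
    rw [hfd, if_pos (by omega)]
    have h4 : ((((l.map Prod.fst).count k / 2 : Nat) : Int) - 0).toNat
        = (l.map Prod.fst).count k / 2 := by omega
    rw [h4]
    unfold dealClusterMid
    rw [pvGrpLen l k, PySem.List.pyGet?_natCast, List.getD_eq_getElem?_getD]
  · rw [if_neg h, if_neg h]
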